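-- pv_equiv track=rewrite | github.com/pypi-data/pypi-mirror-385 | packages/mbake/mbake-1.4.3-py3-none-any.whl/mbake/core/rules/conditionals.py | _is_conditional_directive
-- ===== SOURCE A (Python) =====
-- def _is_conditional_directive(stripped_line: str) -> bool:
--     """Check if line is a conditional directive."""
--     conditional_keywords = ("ifeq", "ifneq", "ifdef", "ifndef", "else", "endif")
--
--     # Check for exact matches at the start of the line
--     for keyword in conditional_keywords:
--         if (
--             stripped_line == keyword
--             or stripped_line.startswith(keyword + " ")
--             or stripped_line.startswith(keyword + "(")
--         ):
--             return True
--
--     # Handle 'else if' variants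
--     return stripped_line.startswith("else ") and any(
--         stripped_line.startswith("else " + kw)
--         for kw in ("ifeq", "ifneq", "ifdef", "ifndef")
--     )
-- ===== SOURCE B (Python) =====
-- def _is_conditional_directive(stripped_line: str) -> bool:
--     """Check if line is a conditional directive."""
--     token = stripped_line.split("(", 1)[0].split(" ", 1)[0]
--     return token in {"ifeq", "ifneq", "ifdef", "ifndef", "else", "endif"}
-- ===== Notes on version B (the rewrite author's own statement) =====
-- stated objective: simpler
-- what changed: Instead of looping over the six keywords testing three prefix forms each (plus a redundant else-if fallback), B extracts the leading token (the substring before the first space or opening parenthesis) once and tests set membership.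
import Mathlib
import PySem

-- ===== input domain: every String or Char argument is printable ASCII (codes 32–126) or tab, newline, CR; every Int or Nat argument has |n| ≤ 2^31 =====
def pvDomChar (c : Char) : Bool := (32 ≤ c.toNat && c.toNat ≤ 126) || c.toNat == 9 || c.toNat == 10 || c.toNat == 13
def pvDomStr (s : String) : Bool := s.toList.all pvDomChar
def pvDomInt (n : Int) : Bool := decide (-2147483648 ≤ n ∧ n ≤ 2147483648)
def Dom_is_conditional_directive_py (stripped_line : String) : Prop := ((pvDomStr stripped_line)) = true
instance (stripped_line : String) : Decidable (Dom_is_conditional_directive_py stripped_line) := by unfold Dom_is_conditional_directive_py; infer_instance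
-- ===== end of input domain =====

-- B replaces A's per-keyword prefix loop (and its dead else-if fallback) by extracting the
-- leading token before the first space or opening parenthesis once and testing set membership (simpler; same cost).

-- ===== PORT A =====
def is_conditional_directive_py (stripped_line : String) : Bool :=
  -- for keyword in (...): if ... : return True   — early-returning loop = List.any
  if (["ifeq", "ifneq", "ifdef", "ifndef", "else", "endif"]).any (fun keyword =>
        stripped_line == keyword
        || PySem.Str.startswith stripped_line (keyword ++ " ")
        || PySem.Str.startswith stripped_line (keyword ++ "(")) then
    true
  else
    PySem.Str.startswith stripped_line "else "
      && (["ifeq", "ifneq", "ifdef", "ifndef"]).any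
            (fun kw => PySem.Str.startswith stripped_line ("else " ++ kw))

-- ===== PORT B =====
def is_conditional_directive_py_alt (stripped_line : String) : Bool :=
  -- token = stripped_line.split("(", 1)[0].split(" ", 1)[0]
  -- (split(d, 1)[0] is exactly the prefix of the string before the first occurrence of d,
  --  i.e. takeWhile (· ≠ d) on the character list — exact for one-character separators)
  let token : List Char :=
    (stripped_line.toList.takeWhile (fun c => !(c == '('))).takeWhile (fun c => !(c == ' '))
  (["ifeq", "ifneq", "ifdef", "ifndef", "else", "endif"]).any (fun k => token == k.toList)

-- ===== PRECONDITION & SPEC =====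
def Spec_is_conditional_directive_py (stripped_line : String) (out : Bool) : Prop := out = is_conditional_directive_py_alt stripped_line
instance (stripped_line : String) (out : Bool) : Decidable (Spec_is_conditional_directive_py stripped_line out) := by unfold Spec_is_conditional_directive_py; infer_instance

-- ===== CLAIM (what is proved, stated in full; the proofs are below) =====
def Claim_equal_is_conditional_directive_py : Prop := ∀ (stripped_line : String), Dom_is_conditional_directive_py stripped_line → Spec_is_conditional_directive_py stripped_line (is_conditional_directive_py stripped_line)

-- ===== LEMMAS AND PROOFS =====

-- The leading token (before the first '(' or ' ') equals ks  ⟺  the string is ks itself or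
-- ks followed immediately by a space or '(' — provided ks itself contains no '(' or ' '.
lemma pv_tok_eq_iff (ks : List Char)
    (h : ks.all (fun c => !(c == '(') && !(c == ' ')) = true) (cs : List Char) :
    (cs = ks ∨ (ks ++ [' ']) <+: cs ∨ (ks ++ ['(']) <+: cs) ↔
      cs.takeWhile (fun c => !(c == '(') && !(c == ' ')) = ks := by
  induction ks generalizing cs with
  | nil =>
    cases cs with
    | nil => simp
    | cons c cs' =>
      simp only [List.nil_append, List.takeWhile_cons, List.cons_prefix_cons, List.nil_prefix,
        and_true]
      by_cases hp : c = '('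
      · simp [hp]
      · by_cases hs : c = ' '
        · simp [hs]
        · rw [if_pos (show (!(c == '(') && !(c == ' ')) = true by simp [hp, hs])]
          constructor
          · rintro (h | h | h)
            · exact absurd h (List.cons_ne_nil _ _)
            · exact absurd h.symm hs
            · exact absurd h.symm hp
          · intro h
            exact absurd h (List.cons_ne_nil _ _)
  | cons k ks' ih =>
    have h' := h
    simp only [List.all_cons, Bool.and_eq_true] at h'
    have hk : (!(k == '(') && !(k == ' ')) = true := by simp [h'.1.1, h'.1.2]
    have hks' : ks'.all (fun c => !(c == '(') && !(c == ' ')) = true := h'.2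
    cases cs with
    | nil => simp
    | cons c cs' =>
      by_cases hck : c = k
      · subst hck
        rw [List.takeWhile_cons, if_pos hk]
        simp only [List.cons_append, List.cons_prefix_cons, List.cons.injEq, true_and]
        exact ih hks' cs'
      · have hkc : ¬ k = c := fun e => hck e.symm
        simp only [List.cons_append, List.takeWhile_cons, List.cons_prefix_cons, List.cons.injEq]
        split_ifs with hcond <;> simp [hck, hkc]

-- A's three-way test for one keyword holds exactly when the leading token is that keyword.
lemma pv_kw_iff (s k : String)
    (h : k.toList.all (fun c => !(c == '(') && !(c == ' ')) = true)
    (hsp : (k ++ " ").toList = k.toList ++ [' '])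
    (hpar : (k ++ "(").toList = k.toList ++ ['(']) :
    ((s == k || PySem.Str.startswith s (k ++ " ") || PySem.Str.startswith s (k ++ "(")) = true) ↔
      s.toList.takeWhile (fun c => !(c == '(') && !(c == ' ')) = k.toList := by
  simp only [Bool.or_eq_true, beq_iff_eq, PySem.Str.startswith_eq, PySem.Chars.startswith_iff,
    hsp, hpar, ← String.toList_inj, or_assoc]
  exact pv_tok_eq_iff k.toList h s.toList

-- ===== VERDICT (by name: the statement is the Claim_ definition above) =====
theorem is_conditional_directive_py_spec : Claim_equal_is_conditional_directive_py := by
  intro s _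
  show is_conditional_directive_py s = is_conditional_directive_py_alt s
  have k1 := pv_kw_iff s "ifeq" (by decide) (by decide) (by decide)
  have k2 := pv_kw_iff s "ifneq" (by decide) (by decide) (by decide)
  have k3 := pv_kw_iff s "ifdef" (by decide) (by decide) (by decide)
  have k4 := pv_kw_iff s "ifndef" (by decide) (by decide) (by decide)
  have k5 := pv_kw_iff s "else" (by decide) (by decide) (by decide)
  have k6 := pv_kw_iff s "endif" (by decide) (by decide) (by decide)
  have htw : (s.toList.takeWhile (fun c => !(c == '('))).takeWhile (fun c => !(c == ' ')) =
      s.toList.takeWhile (fun c => !(c == '(') && !(c == ' ')) := by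
    rw [List.takeWhile_takeWhile]
    congr 1
    funext c
    by_cases h1 : c = '(' <;> by_cases h2 : c = ' ' <;> simp [h1, h2]
  have halt : is_conditional_directive_py_alt s = true ↔
      (s.toList.takeWhile (fun c => !(c == '(') && !(c == ' ')) = "ifeq".toList ∨
       s.toList.takeWhile (fun c => !(c == '(') && !(c == ' ')) = "ifneq".toList ∨
       s.toList.takeWhile (fun c => !(c == '(') && !(c == ' ')) = "ifdef".toList ∨
       s.toList.takeWhile (fun c => !(c == '(') && !(c == ' ')) = "ifndef".toList ∨
       s.toList.takeWhile (fun c => !(c == '(') && !(c == ' ')) = "else".toList ∨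
       s.toList.takeWhile (fun c => !(c == '(') && !(c == ' ')) = "endif".toList) := by
    unfold is_conditional_directive_py_alt
    simp only [htw, List.any_cons, List.any_nil, Bool.or_false, Bool.or_eq_true, beq_iff_eq]
  have hA : is_conditional_directive_py s = true ↔
      (s.toList.takeWhile (fun c => !(c == '(') && !(c == ' ')) = "ifeq".toList ∨
       s.toList.takeWhile (fun c => !(c == '(') && !(c == ' ')) = "ifneq".toList ∨
       s.toList.takeWhile (fun c => !(c == '(') && !(c == ' ')) = "ifdef".toList ∨
       s.toList.takeWhile (fun c => !(c == '(') && !(c == ' ')) = "ifndef".toList ∨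
       s.toList.takeWhile (fun c => !(c == '(') && !(c == ' ')) = "else".toList ∨
       s.toList.takeWhile (fun c => !(c == '(') && !(c == ' ')) = "endif".toList) := by
    unfold is_conditional_directive_py
    simp only [List.any_cons, List.any_nil, Bool.or_false]
    split_ifs with hcond
    · constructor
      · intro _
        simp only [Bool.or_eq_true] at hcond
        rcases hcond with (((h|h)|h) | ((h|h)|h) | ((h|h)|h) | ((h|h)|h) | ((h|h)|h) | ((h|h)|h)) <;>
          first
            | exact Or.inl (k1.mp (by simp only [h, Bool.true_or, Bool.or_true]))
            | exact Or.inr (Or.inl (k2.mp (by simp only [h, Bool.true_or, Bool.or_true])))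
            | exact Or.inr (Or.inr (Or.inl (k3.mp (by simp only [h, Bool.true_or, Bool.or_true]))))
            | exact Or.inr (Or.inr (Or.inr (Or.inl (k4.mp (by simp only [h, Bool.true_or, Bool.or_true])))))
            | exact Or.inr (Or.inr (Or.inr (Or.inr (Or.inl (k5.mp (by simp only [h, Bool.true_or, Bool.or_true]))))))
            | exact Or.inr (Or.inr (Or.inr (Or.inr (Or.inr (k6.mp (by simp only [h, Bool.true_or, Bool.or_true]))))))
      · intro _
        rfl
    · constructor
      · intro htail
        exfalso
        apply hcond
        simp only [Bool.and_eq_true] at htail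
        have h1 := htail.1
        rw [PySem.Str.startswith_eq] at h1
        have h2 := (PySem.Chars.startswith_iff s.toList ("else ").toList).mp h1
        have he : ("else " : String).toList = "else".toList ++ [' '] := by decide
        rw [he] at h2
        have h5 : s.toList.takeWhile (fun c => !(c == '(') && !(c == ' ')) = "else".toList :=
          (pv_tok_eq_iff "else".toList (by decide) s.toList).mp (Or.inr (Or.inl h2))
        simp only [k5.mpr h5, Bool.true_or, Bool.or_true]
      · intro hd
        exfalso
        apply hcond
        rcases hd with h|h|h|h|h|h <;>
          first
            | simp only [k1.mpr h, Bool.true_or]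
            | simp only [k2.mpr h, Bool.true_or, Bool.or_true]
            | simp only [k3.mpr h, Bool.true_or, Bool.or_true]
            | simp only [k4.mpr h, Bool.true_or, Bool.or_true]
            | simp only [k5.mpr h, Bool.true_or, Bool.or_true]
            | simp only [k6.mpr h, Bool.or_true]
  rw [Bool.eq_iff_iff, hA, halt]
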